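-- pv_equiv track=rewrite | github.com/Lee-hanbin/Algorithm | Python/programmers/PCCP_모의고사_1회_1번/PCCP_모의고사_1회_1번.py | solution
-- ===== SOURCE A (Python) =====
-- from collections import defaultdict
--
-- def solution(input_string):
--     dict1 = defaultdict()
--     check = ""
--     alphabet_set = set()
--     answer = set()
--     for alphabet in input_string:
--         if alphabet in alphabet_set:
--             if alphabet != check:
--                 answer.add(alphabet)
--                 check = alphabet
--         else:
--             alphabet_set.add(alphabet)
--             dict1[alphabet] = 1
--             check = alphabet
--     if answer:
--         answer = sorted(list(answer))
--         return ''.join(answer)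
--     else:
--         return "N"
-- ===== SOURCE B (Python) =====
-- from collections import Counter
--
-- def solution(input_string):
--     collapsed = []
--     for ch in input_string:
--         if not collapsed or collapsed[-1] != ch:
--             collapsed.append(ch)
--     counts = Counter(collapsed)
--     repeats = sorted(c for c in counts if counts[c] >= 2)
--     return ''.join(repeats) if repeats else "N"
-- ===== Notes on version B (the rewrite author's own statement) =====
-- stated objective: simpler
-- what changed: B first collapses consecutive duplicate runs into a representative sequence and then counts it with a Counter, collecting chars with count >= 2, instead of A's single pass maintaining a previous-char sentinel, a seen-set, an unused defaultdict and an answer set.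
import Mathlib
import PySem

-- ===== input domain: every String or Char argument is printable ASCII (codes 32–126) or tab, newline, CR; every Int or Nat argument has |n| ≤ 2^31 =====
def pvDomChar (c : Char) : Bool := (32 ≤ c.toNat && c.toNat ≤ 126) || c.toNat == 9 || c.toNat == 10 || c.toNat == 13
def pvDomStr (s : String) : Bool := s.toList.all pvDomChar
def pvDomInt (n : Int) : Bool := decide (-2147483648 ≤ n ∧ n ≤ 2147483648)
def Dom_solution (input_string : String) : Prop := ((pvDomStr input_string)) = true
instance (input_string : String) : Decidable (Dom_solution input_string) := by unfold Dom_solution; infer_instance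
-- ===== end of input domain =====

-- B collapses consecutive runs then counts with a Counter; A keeps running state. Objective: simpler decomposition, same result.

-- ===== PORT A =====
def solStepA (st : PySem.Dict Char Int × String × PySem.Set Char × PySem.Set Char)
    (alphabet : Char) : PySem.Dict Char Int × String × PySem.Set Char × PySem.Set Char :=
  match st with
  | (dict1, check, alphabet_set, answer) =>
    if PySem.Set.contains alphabet_set alphabet then
      if String.ofList [alphabet] ≠ check then
        (dict1, String.ofList [alphabet], alphabet_set, PySem.Set.add answer alphabet)
      else
        (dict1, check, alphabet_set, answer)
    else
      (PySem.Dict.insert dict1 alphabet 1, String.ofList [alphabet],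
        PySem.Set.add alphabet_set alphabet, answer)

def solution (input_string : String) : String :=
  let st := input_string.toList.foldl solStepA
    ((PySem.Dict.empty : PySem.Dict Char Int), "", (PySem.Set.empty : PySem.Set Char),
      (PySem.Set.empty : PySem.Set Char))
  let answer := st.2.2.2
  if answer ≠ [] then
    String.ofList (PySem.List.sorted answer (fun x => x) false)
  else
    "N"

-- ===== PORT B =====
def collapseStep (acc : List Char) (ch : Char) : List Char :=
  if acc = [] ∨ acc.getLast? ≠ some ch then acc ++ [ch] else acc

def solution_alt (input_string : String) : String :=
  let collapsed := input_string.toList.foldl collapseStep []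
  let counts : PySem.Dict Char Int := PySem.Dict.counter collapsed
  let repeats := PySem.List.sorted
    (counts.keys.filter (fun c => decide (2 ≤ counts.getD c 0))) (fun x => x) false
  if repeats ≠ [] then String.ofList repeats else "N"

-- ===== PRECONDITION & SPEC =====
def Spec_solution (input_string : String) (out : String) : Prop := out = solution_alt input_string
instance (input_string : String) (out : String) : Decidable (Spec_solution input_string out) := by unfold Spec_solution; infer_instance

-- ===== CLAIM (what is proved, stated in full; the proofs are below) =====
def Claim_equal_solution : Prop := ∀ (input_string : String), Dom_solution input_string → Spec_solution input_string (solution input_string)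

-- ===== LEMMAS AND PROOFS =====

theorem collapseStep_eq_append (acc : List Char) (a : Char) (h : acc.getLast? ≠ some a) :
    collapseStep acc a = acc ++ [a] := by
  unfold collapseStep
  rw [if_pos (Or.inr h)]

theorem collapseStep_eq_self (acc : List Char) (a : Char) (h : acc.getLast? = some a) :
    collapseStep acc a = acc := by
  unfold collapseStep
  rw [if_neg]
  rintro (hnil | hne)
  · rw [hnil] at h; simp at h
  · exact hne h

theorem collapse_getLast? (cs : List Char) :
    (cs.foldl collapseStep []).getLast? = cs.getLast? := by
  induction cs using List.reverseRecOn with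
  | nil => rfl
  | append_singleton xs a ih =>
    rw [List.foldl_append]
    simp only [List.foldl_cons, List.foldl_nil]
    by_cases h : (xs.foldl collapseStep []).getLast? = some a
    · rw [collapseStep_eq_self _ _ h, h]
      simp
    · rw [collapseStep_eq_append _ _ h]
      simp

theorem mem_collapse (cs : List Char) : ∀ (x : Char),
    x ∈ cs.foldl collapseStep [] ↔ x ∈ cs := by
  induction cs using List.reverseRecOn with
  | nil => simp
  | append_singleton xs a ih =>
    intro x
    rw [List.foldl_append]
    simp only [List.foldl_cons, List.foldl_nil]
    by_cases h : (xs.foldl collapseStep []).getLast? = some a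
    · rw [collapseStep_eq_self _ _ h]
      have ha : a ∈ xs := by
        rw [collapse_getLast?] at h
        exact List.mem_of_getLast? h
      rw [ih x]
      simp only [List.mem_append, List.mem_singleton]
      constructor
      · exact fun hx => Or.inl hx
      · rintro (hx | hx)
        · exact hx
        · subst hx; exact ha
    · rw [collapseStep_eq_append _ _ h]
      simp [ih x]

theorem strOfList_ne (a b : Char) : (String.ofList [a] ≠ String.ofList [b]) ↔ a ≠ b := by
  constructor
  · intro h hab; exact h (by rw [hab])
  · intro h hab
    apply h
    have := congrArg String.toList hab
    rw [String.toList_ofList, String.toList_ofList] at this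
    exact List.singleton_injective this

-- A's fold state: check is (the string of) the last char, alphabet_set the set of chars seen,
-- and a char is in answer iff it occurs at least twice in the run-collapsed sequence.
theorem foldA_invariant (cs : List Char) :
    (cs.foldl solStepA ((PySem.Dict.empty : PySem.Dict Char Int), "",
        (PySem.Set.empty : PySem.Set Char), (PySem.Set.empty : PySem.Set Char))).2.1
      = (match cs.getLast? with | none => "" | some a => String.ofList [a]) ∧
    (cs.foldl solStepA (PySem.Dict.empty, "", PySem.Set.empty, PySem.Set.empty)).2.2.1
      = PySem.Set.ofList cs ∧
    (cs.foldl solStepA (PySem.Dict.empty, "", PySem.Set.empty, PySem.Set.empty)).2.2.2.Nodup ∧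
    (∀ c, c ∈ (cs.foldl solStepA (PySem.Dict.empty, "", PySem.Set.empty, PySem.Set.empty)).2.2.2
      ↔ 2 ≤ (cs.foldl collapseStep []).count c) := by
  induction cs using List.reverseRecOn with
  | nil =>
    refine ⟨rfl, rfl, List.nodup_nil, ?_⟩
    intro c; simp [PySem.Set.empty]
  | append_singleton xs a ih =>
    obtain ⟨hcheck, haset, hnodup, hans⟩ := ih
    rcases hsteq : xs.foldl solStepA ((PySem.Dict.empty : PySem.Dict Char Int), "",
        (PySem.Set.empty : PySem.Set Char), (PySem.Set.empty : PySem.Set Char))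
      with ⟨d, check, aset, ans⟩
    rw [hsteq] at hcheck haset hnodup hans
    simp only at hcheck haset hnodup hans
    rw [List.foldl_append, List.foldl_append, hsteq]
    simp only [List.foldl_cons, List.foldl_nil, List.getLast?_append,
      List.getLast?_singleton, PySem.Set.ofList_append_singleton]
    subst haset
    simp only [solStepA]
    by_cases hmem : a ∈ xs
    · -- a already seen
      rw [if_pos (by rw [PySem.Set.contains_iff, PySem.Set.mem_ofList]; exact hmem)]
      rw [show (PySem.Set.ofList xs).add a = PySem.Set.ofList xs from
        PySem.Set.add_of_mem (by rw [PySem.Set.mem_ofList]; exact hmem)]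
      have hxs_ne : xs ≠ [] := by intro h; subst h; simp at hmem
      obtain ⟨l, hl⟩ : ∃ l, xs.getLast? = some l := by
        cases h : xs.getLast? with
        | none => exact absurd (List.getLast?_eq_none_iff.mp h) hxs_ne
        | some l => exact ⟨l, rfl⟩
      rw [hl] at hcheck
      simp only at hcheck
      subst hcheck
      by_cases hla : a = l
      · -- a equals the previous char: state unchanged, collapse unchanged
        subst hla
        rw [if_neg (by simp)]
        refine ⟨rfl, rfl, hnodup, ?_⟩
        intro c
        rw [collapseStep_eq_self _ _ (by rw [collapse_getLast?, hl])]
        exact hans c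
      · -- a differs from the previous char: answer.add a, collapse appends a
        rw [if_pos (by rw [strOfList_ne]; exact hla)]
        have hcoll : collapseStep (xs.foldl collapseStep []) a
            = xs.foldl collapseStep [] ++ [a] := by
          apply collapseStep_eq_append
          rw [collapse_getLast?, hl]
          intro h
          exact hla (Option.some_injective _ h).symm
        refine ⟨rfl, rfl, PySem.Set.nodup_add _ _ hnodup, ?_⟩
        intro c
        rw [PySem.Set.mem_add, hcoll, List.count_append]
        by_cases hca : c = a
        · subst hca
          have h1 : 1 ≤ (xs.foldl collapseStep []).count c := by
            rw [Nat.one_le_iff_ne_zero, Ne, List.count_eq_zero]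
            intro h; exact h ((mem_collapse xs c).mpr hmem)
          have hc1 : List.count c [c] = 1 := by simp
          rw [hc1]
          constructor
          · intro _; omega
          · intro _; right; rfl
        · have hc0 : List.count c [a] = 0 := by simp [Ne.symm hca]
          rw [hc0, hans c]
          constructor
          · rintro (h | h)
            · omega
            · exact absurd h hca
          · intro h; left; omega
    · -- a not yet seen
      rw [if_neg (by rw [PySem.Set.contains_iff, PySem.Set.mem_ofList]; exact fun h => hmem h)]
      have hcoll : collapseStep (xs.foldl collapseStep []) a
          = xs.foldl collapseStep [] ++ [a] := by
        apply collapseStep_eq_append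
        rw [collapse_getLast?]
        intro h
        exact hmem (List.mem_of_getLast? h)
      refine ⟨rfl, rfl, hnodup, ?_⟩
      intro c
      rw [hcoll, List.count_append]
      by_cases hca : c = a
      · subst hca
        have h0 : (xs.foldl collapseStep []).count c = 0 :=
          List.count_eq_zero.mpr (fun h => hmem ((mem_collapse xs c).mp h))
        have hc1 : List.count c [c] = 1 := by simp
        rw [hans c, h0, hc1]
        omega
      · have hc0 : List.count c [a] = 0 := by simp [Ne.symm hca]
        rw [hc0, hans c]
        omega

-- membership characterisation of B's filtered key list
theorem mem_repeats (cs : List Char) (c : Char) :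
    c ∈ (PySem.Dict.counter (cs.foldl collapseStep [])).keys.filter
        (fun c => decide (2 ≤ (PySem.Dict.counter (cs.foldl collapseStep [])).getD c 0))
      ↔ 2 ≤ (cs.foldl collapseStep []).count c := by
  rw [List.mem_filter, PySem.Dict.keys_counter, PySem.Set.mem_ofList,
    PySem.Dict.getD_counter]
  constructor
  · rintro ⟨-, h⟩
    have := of_decide_eq_true h
    exact_mod_cast this
  · intro h
    refine ⟨?_, decide_eq_true (by exact_mod_cast h)⟩
    have h1 : 1 ≤ (cs.foldl collapseStep []).count c := le_trans (by norm_num) h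
    rw [Nat.one_le_iff_ne_zero, Ne, List.count_eq_zero] at h1
    simpa using h1

theorem final_eq (cs : List Char) :
    (if (cs.foldl solStepA ((PySem.Dict.empty : PySem.Dict Char Int), "",
          (PySem.Set.empty : PySem.Set Char), (PySem.Set.empty : PySem.Set Char))).2.2.2 ≠ [] then
        String.ofList (PySem.List.sorted
          ((cs.foldl solStepA ((PySem.Dict.empty : PySem.Dict Char Int), "",
            (PySem.Set.empty : PySem.Set Char), (PySem.Set.empty : PySem.Set Char))).2.2.2)
          (fun x => x) false)
      else "N")
    = (if PySem.List.sorted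
          ((PySem.Dict.counter (cs.foldl collapseStep [])).keys.filter
            (fun c => decide (2 ≤ (PySem.Dict.counter (cs.foldl collapseStep [])).getD c 0)))
          (fun x => x) false ≠ [] then
        String.ofList (PySem.List.sorted
          ((PySem.Dict.counter (cs.foldl collapseStep [])).keys.filter
            (fun c => decide (2 ≤ (PySem.Dict.counter (cs.foldl collapseStep [])).getD c 0)))
          (fun x => x) false)
      else "N") := by
  obtain ⟨-, -, hnodup, hans⟩ := foldA_invariant cs
  set ansA := (cs.foldl solStepA ((PySem.Dict.empty : PySem.Dict Char Int), "",
    (PySem.Set.empty : PySem.Set Char), (PySem.Set.empty : PySem.Set Char))).2.2.2 with hA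
  set repB := (PySem.Dict.counter (cs.foldl collapseStep [])).keys.filter
    (fun c => decide (2 ≤ (PySem.Dict.counter (cs.foldl collapseStep [])).getD c 0))
    with hB
  have hnodupB : repB.Nodup := by
    rw [hB, PySem.Dict.keys_counter]
    exact (PySem.Set.nodup_ofList _).filter _
  have hperm : ansA.Perm repB := by
    rw [List.perm_ext_iff_of_nodup hnodup hnodupB]
    intro c
    rw [hans c, hB, mem_repeats]
  have hsorted : PySem.List.sorted ansA (fun x => x) false
      = PySem.List.sorted repB (fun x => x) false :=
    PySem.List.sorted_eq_sorted_of_perm _ _ _ (fun _ _ h => h) hperm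
  by_cases hempty : ansA = []
  · have hBnil : repB = [] := by
      have hlen := hperm.length_eq
      rw [hempty] at hlen
      exact List.eq_nil_of_length_eq_zero hlen.symm
    have hsnil : PySem.List.sorted repB (fun x => x) false = [] := by
      rw [PySem.List.sorted_eq_nil_iff]; exact hBnil
    rw [if_neg (not_not_intro hempty), if_neg (not_not_intro hsnil)]
  · have hBne : repB ≠ [] := by
      intro h
      have hlen := hperm.length_eq
      rw [h] at hlen
      exact hempty (List.eq_nil_of_length_eq_zero hlen)
    have hsB : PySem.List.sorted repB (fun x => x) false ≠ [] := by
      rw [Ne, PySem.List.sorted_eq_nil_iff]; exact hBne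
    rw [if_pos hempty, if_pos hsB, hsorted]

-- ===== VERDICT (by name: the statement is the Claim_ definition above) =====
theorem solution_spec : Claim_equal_solution := by
  intro s _
  unfold Spec_solution solution solution_alt
  exact final_eq s.toList
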